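-- pv_equiv track=rewrite | github.com/MrBrantCode/unitest_baseline | mut_generate/mist_train_cf/cf_60160/solution.py | merge_and_compare
-- ===== SOURCE A (Python) =====
-- def merge_and_compare(dict1, dict2):
--     result = {}
--     for key in set(dict1.keys()).union(dict2.keys()):
--         if key in dict1 and key in dict2:
--             result[key] = abs(dict1[key] - dict2[key])
--         elif key in dict1:
--             result[key] = dict1[key]
--         else:
--             result[key] = dict2[key]
--     return result
-- ===== SOURCE B (Python) =====
-- def merge_and_compare(dict1, dict2):
--     groups = {}
--     for d in (dict1, dict2):
--         for key, value in d.items():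
--             groups.setdefault(key, []).append(value)
--     return {key: vs[0] if len(vs) == 1 else abs(vs[0] - vs[1])
--             for key, vs in groups.items()}
-- ===== Notes on version B (the rewrite author's own statement) =====
-- stated objective: alternative
-- what changed: B replaces A's key-union set and per-key membership/branch logic with a grouping algorithm: it builds a multimap key -> list of values from both dicts and then collapses each group (singleton -> the value, pair -> abs difference) in one comprehension, with no membership tests at all.
import Mathlib
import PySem

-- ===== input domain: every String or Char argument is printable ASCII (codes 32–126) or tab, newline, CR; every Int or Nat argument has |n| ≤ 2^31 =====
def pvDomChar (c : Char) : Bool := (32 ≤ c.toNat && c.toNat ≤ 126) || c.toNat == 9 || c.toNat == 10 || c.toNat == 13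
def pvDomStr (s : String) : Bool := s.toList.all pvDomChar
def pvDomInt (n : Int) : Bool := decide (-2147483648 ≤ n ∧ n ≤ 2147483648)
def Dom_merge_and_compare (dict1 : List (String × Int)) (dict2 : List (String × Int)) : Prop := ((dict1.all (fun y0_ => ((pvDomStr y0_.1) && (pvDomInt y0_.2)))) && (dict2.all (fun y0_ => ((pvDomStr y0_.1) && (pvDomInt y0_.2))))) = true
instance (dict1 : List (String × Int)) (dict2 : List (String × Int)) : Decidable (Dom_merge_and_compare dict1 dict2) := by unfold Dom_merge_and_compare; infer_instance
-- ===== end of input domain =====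

-- B replaces A's key-union set and per-key membership branches by a grouping algorithm:
-- a multimap key -> list of values built from both dicts, each group then collapsed
-- (singleton -> the value, pair -> abs difference); objective: alternative, return values proved equal.


-- ===== PORT A =====
-- The parameters are Python dicts: the association lists are read as dicts (PySem.Dict.ofList,
-- duplicate keys overwritten in place, exactly dict(pairs)).  Python's set iteration order is
-- arbitrary; here the union set is in first-insertion order (exact as a set, and dict outputs
-- are compared ignoring order).  dict1[key]/dict2[key] are taken under the matching 'in' guard,
-- so getD with default 0 is exact.
def merge_and_compare (dict1 : List (String × Int)) (dict2 : List (String × Int)) : List (String × Int) :=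
  let d1 : PySem.Dict String Int := PySem.Dict.ofList dict1
  let d2 : PySem.Dict String Int := PySem.Dict.ofList dict2
  -- set(dict1.keys()).union(dict2.keys())
  let ks : PySem.Set String := PySem.Set.update (PySem.Set.ofList d1.keys) d2.keys
  let result : PySem.Dict String Int :=
    ks.foldl (fun r k =>
      if d1.contains k && d2.contains k then
        r.insert k |d1.getD k 0 - d2.getD k 0|
      else if d1.contains k then
        r.insert k (d1.getD k 0)
      else
        r.insert k (d2.getD k 0)) PySem.Dict.empty
  result.items

-- ===== PORT B =====
-- vs[0] if len(vs) == 1 else abs(vs[0] - vs[1]): the indexings are taken under the length guard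
-- (every group list B builds has one or two elements), so headD 0 / getD 1 0 are exact there.
def pvCollapse (vs : List Int) : Int :=
  if vs.length = 1 then vs.headD 0 else |vs.headD 0 - vs.getD 1 0|

def merge_and_compare_alt (dict1 : List (String × Int)) (dict2 : List (String × Int)) : List (String × Int) :=
  -- groups.setdefault(key, []).append(value)  ==  groups[key] = groups.get(key, []) + [value]
  let groups : PySem.Dict String (List Int) :=
    [PySem.Dict.ofList dict1, PySem.Dict.ofList dict2].foldl
      (fun g d => d.items.foldl
        (fun g kv => g.modify kv.1 [] (fun vs => vs ++ [kv.2])) g)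
      PySem.Dict.empty
  -- {key: … for key, vs in groups.items()}
  (groups.items.foldl (fun r kv => r.insert kv.1 (pvCollapse kv.2)) PySem.Dict.empty).items

-- ===== PRECONDITION & SPEC =====
def Spec_merge_and_compare (dict1 : List (String × Int)) (dict2 : List (String × Int)) (out : List (String × Int)) : Prop := out = merge_and_compare_alt dict1 dict2
instance (dict1 : List (String × Int)) (dict2 : List (String × Int)) (out : List (String × Int)) : Decidable (Spec_merge_and_compare dict1 dict2 out) := by unfold Spec_merge_and_compare; infer_instance

-- ===== CLAIM (what is proved, stated in full; the proofs are below) =====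
def Claim_equal_merge_and_compare : Prop := ∀ (dict1 : List (String × Int)) (dict2 : List (String × Int)), Dom_merge_and_compare dict1 dict2 → Spec_merge_and_compare dict1 dict2 (merge_and_compare dict1 dict2)

-- ===== LEMMAS AND PROOFS =====

-- A's per-key merged value, as a function of the key only.
def pvVA (d1 d2 : PySem.Dict String Int) (k : String) : Int :=
  if d1.contains k && d2.contains k then |d1.getD k 0 - d2.getD k 0|
  else if d1.contains k then d1.getD k 0
  else d2.getD k 0

theorem pv_contains_iff_mem_keys (d : PySem.Dict String Int) (k : String) :
    d.contains k = true ↔ k ∈ d.keys := by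
  simp [PySem.Dict.contains, PySem.Dict.keys, List.any_eq_true]

-- In a list with distinct keys, the entries at key k are exactly the found one.
theorem pv_filter_of_find?_some (l : List (String × Int)) (k : String)
    (hn : (l.map Prod.fst).Nodup) (kv : String × Int) (hkvmem : kv ∈ l) (hkvk : kv.1 = k) :
    l.filter (fun p => p.1 == k) = [kv] := by
  induction l with
  | nil => cases hkvmem
  | cons a t ih =>
    simp only [List.map_cons, List.nodup_cons] at hn
    rcases List.mem_cons.1 hkvmem with hkva | hkvt
    · subst hkva
      have hrest : t.filter (fun p => p.1 == k) = [] := by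
        rw [List.filter_eq_nil_iff]
        intro p hp h
        exact hn.1 (by simpa [hkvk, (beq_iff_eq).1 h] using
          List.mem_map_of_mem (f := Prod.fst) hp)
      simp [hkvk, hrest]
    · have hak : (a.1 == k) = false := by
        by_contra h
        rw [Bool.not_eq_false, beq_iff_eq] at h
        exact hn.1 (by simpa [h, hkvk] using List.mem_map_of_mem (f := Prod.fst) hkvt)
      rw [List.filter_cons, if_neg (by simp [hak])]
      exact ih hn.2 hkvt

-- The values a dict contributes to key k: one element if it holds k, none otherwise.
theorem pv_filter_items_key (d : PySem.Dict String Int) (k : String) (hnd : d.keys.Nodup) :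
    ((d.items.filter (fun p => p.1 == k)).map (·.2))
      = if d.contains k then [d.getD k 0] else [] := by
  cases hfind : d.items.find? (fun p => p.1 == k) with
  | none =>
    have hnone : ∀ p ∈ d.items, ¬ (p.1 == k) = true := List.find?_eq_none.1 hfind
    have hfilter : d.items.filter (fun p => p.1 == k) = [] := by
      rw [List.filter_eq_nil_iff]; exact hnone
    have hc : d.contains k = false := by
      rw [← Bool.not_eq_true, pv_contains_iff_mem_keys]
      intro hmem
      obtain ⟨p, hp, hfst⟩ := List.mem_map.1 hmem
      exact hnone p hp (by simp [hfst])
    simp [hfilter, hc]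
  | some kv =>
    have hkvmem := List.mem_of_find?_eq_some hfind
    have hkvk : kv.1 = k := by simpa using List.find?_some hfind
    have hc : d.contains k = true := by
      rw [pv_contains_iff_mem_keys]
      exact List.mem_map.2 ⟨kv, hkvmem, hkvk⟩
    have hget : d.getD k 0 = kv.2 := by
      simp [PySem.Dict.getD, PySem.Dict.get?, hfind]
    -- filter keeps exactly kv: any other entry with key k would duplicate a key
    have hfilter : d.items.filter (fun p => p.1 == k) = [kv] :=
      pv_filter_of_find?_some d.items k hnd kv hkvmem hkvk
    simp [hfilter, hc, hget]

theorem merge_and_compare_eq (dict1 dict2 : List (String × Int)) :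
    merge_and_compare dict1 dict2 = merge_and_compare_alt dict1 dict2 := by
  unfold merge_and_compare merge_and_compare_alt
  set d1 : PySem.Dict String Int := PySem.Dict.ofList dict1 with hd1
  set d2 : PySem.Dict String Int := PySem.Dict.ofList dict2 with hd2
  have h1 : d1.keys.Nodup := PySem.Dict.nodup_keys_ofList dict1
  have h2 : d2.keys.Nodup := PySem.Dict.nodup_keys_ofList dict2
  have hU : PySem.Set.update (PySem.Set.ofList d1.keys) d2.keys
      = PySem.Set.update d1.keys d2.keys := by
    rw [PySem.Set.ofList_eq_self_of_nodup _ h1]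
  have hUnd : (PySem.Set.update d1.keys d2.keys : List String).Nodup :=
    PySem.Set.nodup_update _ _ h1
  -- ---- A's side: items = union keys mapped to pvVA ----
  have hbodyA : (fun (r : PySem.Dict String Int) k =>
      if d1.contains k && d2.contains k then r.insert k |d1.getD k 0 - d2.getD k 0|
      else if d1.contains k then r.insert k (d1.getD k 0)
      else r.insert k (d2.getD k 0))
      = fun r k => r.insert k (pvVA d1 d2 k) := by
    funext r k; unfold pvVA; split_ifs <;> rfl
  have hA : (List.foldl (fun r k => r.insert k (pvVA d1 d2 k)) PySem.Dict.empty
        (PySem.Set.update d1.keys d2.keys)).items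
      = (PySem.Set.update d1.keys d2.keys).map (fun k => (k, pvVA d1 d2 k)) := by
    have := PySem.Dict.items_foldl_insert_fresh
      (l := (PySem.Set.update d1.keys d2.keys : List String))
      (k := fun x => x) (v := fun k => pvVA d1 d2 k) (d := PySem.Dict.empty)
      (by intro a _; rfl) (by simpa using hUnd)
    simpa using this
  -- ---- B's side ----
  -- the two nested loops are one fold over the concatenated item lists
  have hgroups : [d1, d2].foldl
      (fun g d => d.items.foldl
        (fun g kv => g.modify kv.1 [] (fun vs => vs ++ [kv.2])) g)
      PySem.Dict.empty
      = (d1.items ++ d2.items).foldl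
        (fun g kv => g.modify kv.1 [] (fun vs => vs ++ [kv.2])) PySem.Dict.empty := by
    simp [List.foldl_append]
  set L : List (String × Int) := d1.items ++ d2.items with hL
  set groups : PySem.Dict String (List Int) :=
    L.foldl (fun g kv => g.modify kv.1 [] (fun vs => vs ++ [kv.2])) PySem.Dict.empty
    with hg
  have hkeysG : groups.keys = PySem.Set.update d1.keys d2.keys := by
    rw [hg, PySem.Dict.keys_foldl_modify_key]
    have : L.map Prod.fst = d1.keys ++ d2.keys := by
      simp [hL, PySem.Dict.keys]
    rw [this, PySem.Dict.keys_empty, PySem.Set.update_nil_left, PySem.Set.ofList_append,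
      PySem.Set.ofList_eq_self_of_nodup _ h1]
  have hndG : groups.keys.Nodup := by
    rw [hg]
    exact PySem.Dict.nodup_keys_foldl_modify_key _ _ _ _ _ PySem.Dict.nodup_keys_empty
  have hgetG : ∀ k, groups.getD k [] = (L.filter (fun p => p.1 == k)).map (·.2) := by
    intro k
    rw [hg, PySem.Dict.getD_foldl_modify_append, PySem.Dict.getD_empty]
    simp
  -- groups' value at each union key is the contribution list of d1 followed by d2's
  have hval : ∀ k ∈ (PySem.Set.update d1.keys d2.keys : List String),
      pvCollapse (groups.getD k []) = pvVA d1 d2 k := by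
    intro k hk
    rw [hgetG k, hL, List.filter_append, List.map_append,
      pv_filter_items_key d1 k h1, pv_filter_items_key d2 k h2]
    have hmem : k ∈ d1.keys ∨ k ∈ d2.keys := (PySem.Set.mem_update _ _ _).1 hk
    by_cases hc1 : d1.contains k = true
    · by_cases hc2 : d2.contains k = true
      · simp [hc1, hc2, pvCollapse, pvVA]
      · simp only [Bool.not_eq_true] at hc2
        simp [hc1, hc2, pvCollapse, pvVA]
    · simp only [Bool.not_eq_true] at hc1
      have hc2 : d2.contains k = true := by
        rw [pv_contains_iff_mem_keys]
        rcases hmem with h | h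
        · exact absurd ((pv_contains_iff_mem_keys d1 k).2 h) (by simp [hc1])
        · exact h
      simp [hc1, hc2, pvCollapse, pvVA]
  -- the comprehension over groups.items appends fresh distinct keys
  have hB : (groups.items.foldl (fun r kv => r.insert kv.1 (pvCollapse kv.2))
        PySem.Dict.empty).items
      = groups.items.map (fun kv => (kv.1, pvCollapse kv.2)) := by
    have := PySem.Dict.items_foldl_insert_fresh
      (l := groups.items) (k := Prod.fst) (v := fun kv => pvCollapse kv.2)
      (d := PySem.Dict.empty) (by intro a _; rfl) hndG
    simpa using this
  have hitemsG : groups.items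
      = (PySem.Set.update d1.keys d2.keys).map (fun k => (k, groups.getD k [])) := by
    rw [PySem.Dict.items_eq_map_keys groups hndG [], hkeysG]
  simp only [hU, hbodyA, hA, hgroups]
  rw [hB, hitemsG, List.map_map]
  apply List.map_congr_left
  intro k hk
  simp [Function.comp, hval k hk]

-- ===== VERDICT (by name: the statement is the Claim_ definition above) =====
theorem merge_and_compare_spec : Claim_equal_merge_and_compare := by
  intro dict1 dict2 _
  unfold Spec_merge_and_compare
  exact merge_and_compare_eq dict1 dict2
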